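-- pv_equiv track=rewrite | github.com/aquamarin97/pharmalyzer | app/utils/well_mapping.py | wells_for_header
-- ===== SOURCE A (Python) =====
-- import string
-- from typing import Iterable, Optional, Set, Tuple
--
-- ROWS = tuple(string.ascii_uppercase[:8])  # A-H
--
-- COLUMNS = tuple(range(1, 13))  # 1-12
--
-- def all_well_ids() -> Set[str]:
--     """Return a set with all 96 well ids in column-major order."""
--     wells: list[str] = []
--     for col in COLUMNS:
--         for row in ROWS:
--             wells.append(_format_well(row, col))
--     return set(wells)
--
-- def table_index_to_well_id(row: int, column: int) -> Optional[str]: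
--     """Convert a table index (with headers) to a well id. Returns None for header cells."""
--     if row <= 0 or column <= 0:
--         return None
--     row_idx = row - 1
--     col_idx = column - 1
--     if row_idx >= len(ROWS) or col_idx >= len(COLUMNS):
--         return None
--     return _format_well(ROWS[row_idx], COLUMNS[col_idx])
--
-- def wells_for_header(row: int, column: int) -> Set[str]:
--     """
--     Return the set of wells represented by a header/index position:
--     - (0,0): all wells
--     - (0, c): entire column
--     - (r, 0): entire row
--     - otherwise: single well
--     """
--     if row == 0 and column == 0:
--         return all_well_ids()
--
--     if row == 0 and column > 0:
--         col = column
--         if col in COLUMNS: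
--             return {_format_well(r, col) for r in ROWS}
--         return set()
--
--     if column == 0 and row > 0:
--         r_idx = row - 1
--         if 0 <= r_idx < len(ROWS):
--             row_label = ROWS[r_idx]
--             return {_format_well(row_label, c) for c in COLUMNS}
--         return set()
--
--     well = table_index_to_well_id(row, column)
--     return {well} if well else set()
--
-- def _format_well(row: str, column: int) -> str:
--     return f"{row}{column:02d}"
-- ===== SOURCE B (Python) =====
-- ROWS = "ABCDEFGH"
--
--
-- def wells_for_header(row: int, column: int):
--     """Two independent selections (rows, columns) combined by a cartesian product."""
--     sel_rows = list(ROWS) if row == 0 else ([ROWS[row - 1]] if 1 <= row <= 8 else [])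
--     sel_cols = list(range(1, 13)) if column == 0 else ([column] if 1 <= column <= 12 else [])
--     return {f"{r}{c:02d}" for c in sel_cols for r in sel_rows}
-- ===== Notes on version B (the rewrite author's own statement) =====
-- stated objective: simpler
-- what changed: Replaces A's four-way branch dispatch (with a helper call and membership/index checks per branch) by two independent row/column selections combined in a single cartesian-product set comprehension.
import Mathlib
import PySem

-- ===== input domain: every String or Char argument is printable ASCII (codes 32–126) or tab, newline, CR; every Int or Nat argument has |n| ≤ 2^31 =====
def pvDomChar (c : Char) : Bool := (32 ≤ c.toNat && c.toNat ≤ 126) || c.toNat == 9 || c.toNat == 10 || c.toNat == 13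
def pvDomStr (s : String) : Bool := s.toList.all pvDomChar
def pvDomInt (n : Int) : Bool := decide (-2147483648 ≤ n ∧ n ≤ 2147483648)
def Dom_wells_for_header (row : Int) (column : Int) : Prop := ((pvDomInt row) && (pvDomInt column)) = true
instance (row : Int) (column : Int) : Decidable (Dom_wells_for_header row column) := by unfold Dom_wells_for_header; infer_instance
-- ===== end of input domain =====

-- B replaces A's four-way branch dispatch by two independent row/column selections
-- combined with one cartesian product (objective: simpler; same cost).

-- ===== PORT A =====
-- shared module constants ROWS / COLUMNS and the helper _format_well
def pvROWS : List String := ["A", "B", "C", "D", "E", "F", "G", "H"]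
def pvCOLUMNS : List Int := [1, 2, 3, 4, 5, 6, 7, 8, 9, 10, 11, 12]
-- f"{row}{column:02d}" — exact for 0 ≤ column < 100 (both programs only format columns 1..12)
def pvFormatWell (r : String) (c : Int) : String :=
  r ++ (if c < 10 then "0" ++ PySem.Int.toStr c else PySem.Int.toStr c)

def pvAllWellIds : List String :=
  PySem.Set.ofList
    (pvCOLUMNS.foldl (fun ws c => pvROWS.foldl (fun ws2 r => ws2 ++ [pvFormatWell r c]) ws) [])

def pvTableIndexToWellId (row : Int) (column : Int) : Option String :=
  if row ≤ 0 ∨ column ≤ 0 then none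
  else
    let ri := row - 1
    let ci := column - 1
    if ri ≥ (pvROWS.length : Int) ∨ ci ≥ (pvCOLUMNS.length : Int) then none
    else
      match PySem.List.pyGet? pvROWS ri, PySem.List.pyGet? pvCOLUMNS ci with
      | some r, some c => some (pvFormatWell r c)
      | _, _ => none

def wells_for_header (row : Int) (column : Int) : List String :=
  if row = 0 ∧ column = 0 then pvAllWellIds
  else if row = 0 ∧ column > 0 then
    if column ∈ pvCOLUMNS then PySem.Set.ofList (pvROWS.map (fun r => pvFormatWell r column))
    else []
  else if column = 0 ∧ row > 0 then
    let ri := row - 1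
    if 0 ≤ ri ∧ ri < (pvROWS.length : Int) then
      match PySem.List.pyGet? pvROWS ri with
      | some rl => PySem.Set.ofList (pvCOLUMNS.map (fun c => pvFormatWell rl c))
      | none => []
    else []
  else
    match pvTableIndexToWellId row column with
    | some w => if w = "" then [] else PySem.Set.ofList [w]   -- '{well} if well else set()'
    | none => []

-- ===== PORT B =====
def wells_for_header_alt (row : Int) (column : Int) : List String :=
  let sel_rows : List String :=
    if row = 0 then pvROWS
    else if 1 ≤ row ∧ row ≤ 8 then
      match PySem.List.pyGet? pvROWS (row - 1) with
      | some r => [r]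
      | none => []
    else []
  let sel_cols : List Int :=
    if column = 0 then pvCOLUMNS
    else if 1 ≤ column ∧ column ≤ 12 then [column] else []
  PySem.Set.ofList (sel_cols.flatMap (fun c => sel_rows.map (fun r => pvFormatWell r c)))

-- ===== PRECONDITION & SPEC =====
def Spec_wells_for_header (row : Int) (column : Int) (out : List String) : Prop := out = wells_for_header_alt row column
instance (row : Int) (column : Int) (out : List String) : Decidable (Spec_wells_for_header row column out) := by unfold Spec_wells_for_header; infer_instance

-- ===== CLAIM (what is proved, stated in full; the proofs are below) =====
def Claim_equal_wells_for_header : Prop := ∀ (row : Int) (column : Int), Dom_wells_for_header row column → Spec_wells_for_header row column (wells_for_header row column)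

-- ===== LEMMAS AND PROOFS =====

lemma alt_empty_row {row column : Int} (h : row < 0 ∨ 8 < row) :
    wells_for_header_alt row column = [] := by
  unfold wells_for_header_alt
  have h0 : ¬ row = 0 := by omega
  have h1 : ¬ (1 ≤ row ∧ row ≤ 8) := by omega
  have hfm : ∀ l : List Int, l.flatMap (fun _ => ([] : List String)) = [] := by simp
  simp [h0, h1, hfm]

lemma alt_empty_col {row column : Int} (h : column < 0 ∨ 12 < column) :
    wells_for_header_alt row column = [] := by
  unfold wells_for_header_alt
  have h0 : ¬ column = 0 := by omega
  have h1 : ¬ (1 ≤ column ∧ column ≤ 12) := by omega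
  simp [h0, h1]

lemma a_empty_row {row column : Int} (h : row < 0 ∨ 8 < row) :
    wells_for_header row column = [] := by
  unfold wells_for_header pvTableIndexToWellId
  have h0 : ¬ (row = 0 ∧ column = 0) := by omega
  have h1 : ¬ (row = 0 ∧ column > 0) := by omega
  simp only [h0, h1, if_false]
  rcases h with h | h
  · have h2 : ¬ (column = 0 ∧ row > 0) := by omega
    have h3 : row ≤ 0 ∨ column ≤ 0 := by omega
    simp [h2, h3]
  · by_cases hc : column = 0
    · have h2 : (column = 0 ∧ row > 0) := by omega
      have h3 : ¬ (0 ≤ row - 1 ∧ row - 1 < (pvROWS.length : Int)) := by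
        rw [show pvROWS.length = 8 from rfl]; push_cast; omega
      simp only [h2, and_self, if_true]
      rw [if_neg h3]
    · have h2 : ¬ (column = 0 ∧ row > 0) := by omega
      by_cases h3 : row ≤ 0 ∨ column ≤ 0
      · simp [h2, h3]
      · simp only [h2, if_false, h3, pvROWS, pvCOLUMNS, List.length_cons, List.length_nil]
        have h4 : (8:Int) < row ∨ (12:Int) < column := by omega
        simp [h4]

lemma a_empty_col {row column : Int} (h : column < 0 ∨ 12 < column) :
    wells_for_header row column = [] := by
  unfold wells_for_header pvTableIndexToWellId
  have h0 : ¬ (row = 0 ∧ column = 0) := by omega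
  have h2 : ¬ (column = 0 ∧ row > 0) := by omega
  simp only [h0, h2, if_false]
  by_cases h1 : row = 0 ∧ column > 0
  · have hm : column ∉ pvCOLUMNS := by simp [pvCOLUMNS]; omega
    simp [h1, hm]
  · by_cases h3 : row ≤ 0 ∨ column ≤ 0
    · simp [h1, h3]
    · simp only [h1, if_false, h3, pvROWS, pvCOLUMNS, List.length_cons, List.length_nil]
      have h4 : (8:Int) < row ∨ (12:Int) < column := by omega
      simp [h4]

set_option maxRecDepth 40000 in
lemma ab_agree (row column : Int) :
    wells_for_header row column = wells_for_header_alt row column := by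
  by_cases hr : 0 ≤ row ∧ row ≤ 8
  · by_cases hc : 0 ≤ column ∧ column ≤ 12
    · obtain ⟨hr1, hr2⟩ := hr
      obtain ⟨hc1, hc2⟩ := hc
      interval_cases row <;> interval_cases column <;> decide
    · have h : column < 0 ∨ 12 < column := by omega
      rw [a_empty_col h, alt_empty_col h]
  · have h : row < 0 ∨ 8 < row := by omega
    rw [a_empty_row h, alt_empty_row h]

-- ===== VERDICT (by name: the statement is the Claim_ definition above) =====
theorem wells_for_header_spec : Claim_equal_wells_for_header := by
  intro row column _
  unfold Spec_wells_for_header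
  exact ab_agree row column
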